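-- pv_equiv track=rewrite | github.com/Nucaranlaeg/KOTH-random-prisoner | contestants/min_maxer.py | strategize
-- ===== SOURCE A (Python) =====
-- def strategize(grid, store):
--     max_best_moves = []
--     max_best_move_score = float("-inf")
--
--     for my_move in range(3):
--         worst_score = min(grid[my_move])
--         if worst_score == max_best_move_score: max_best_moves.append(my_move)
--         elif worst_score > max_best_move_score:
--             max_best_move_score = worst_score
--             max_best_moves = [my_move]
--
--     min_best_moves = []
--     min_best_move_score = float("inf")
--
--     for my_move in range(3):
--         opp_best_score = max(grid[opp_move][my_move] for opp_move in range(3))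
--         if opp_best_score == min_best_move_score: min_best_moves.append(my_move)
--         elif opp_best_score < min_best_move_score:
--             min_best_move_score = opp_best_score
--             min_best_moves = [my_move]
--
--     best_of_both = [move for move in max_best_moves if move in min_best_moves]
--     if best_of_both: return best_of_both[0]
--     return max_best_moves[0]
-- ===== SOURCE B (Python) =====
-- def strategize(grid, store):
--     # Argmin selection with a lexicographic penalty key instead of building
--     # tie lists and intersecting: a move is penalised 2 for not being maximin
--     # and 1 for not being minimax; min() picks the first move with the least
--     # penalty, which is exactly A's intersection-or-first-maximin rule
--     # (some move always has the maximin score, so penalty < 2 is attainable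
--     # there and the chosen move is always a maximin move).
--     best = max(min(grid[i]) for i in range(3))
--     worst = min(max(grid[o][m] for o in range(3)) for m in range(3))
--     return min(range(3),
--                key=lambda m: 2 * (min(grid[m]) != best)
--                              + (max(grid[o][m] for o in range(3)) != worst))
-- ===== Notes on version B (the rewrite author's own statement) =====
-- stated objective: idiomatic
-- what changed: Replaces A's two tie-list-building argmax/argmin loops plus list intersection by a single min(range(3), key=...) argmin over a 2*(not maximin)+(not minimax) penalty key, which encodes the intersection-or-first-maximin rule without constructing any candidate lists.
import Mathlib
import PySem

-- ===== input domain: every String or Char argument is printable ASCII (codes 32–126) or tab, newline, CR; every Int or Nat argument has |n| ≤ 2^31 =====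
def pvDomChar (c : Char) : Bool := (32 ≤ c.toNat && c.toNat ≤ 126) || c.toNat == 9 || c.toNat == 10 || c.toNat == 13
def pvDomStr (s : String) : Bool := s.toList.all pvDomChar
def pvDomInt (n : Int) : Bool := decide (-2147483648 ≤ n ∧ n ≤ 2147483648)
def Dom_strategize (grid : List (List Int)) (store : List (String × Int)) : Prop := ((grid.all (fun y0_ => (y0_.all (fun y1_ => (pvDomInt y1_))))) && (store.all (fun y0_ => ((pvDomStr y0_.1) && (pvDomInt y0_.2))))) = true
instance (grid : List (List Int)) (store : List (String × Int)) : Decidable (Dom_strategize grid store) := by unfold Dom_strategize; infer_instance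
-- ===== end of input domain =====

-- B selects the move by a single argmin over a 2*(not maximin)+(not minimax) penalty key,
-- instead of A's tie-list building and intersection; objective: idiomatic selection.


-- ===== PORT A =====
-- grid[i] (index always in range under Pre_)
def pvRow (grid : List (List Int)) (i : Int) : List Int := PySem.List.pyGetD grid i []

-- body of A's first loop: online argmax of the row minimum, tracking (tied moves, best so far);
-- the float('-inf') sentinel is the `none` state (never equal, always beaten).
-- min(...) is totalized with .getD 0: under Pre_ the row is nonempty so the default is never used.
def pvBody1 (grid : List (List Int)) (st : List Int × Option Int) (my_move : Int) : List Int × Option Int :=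
  let worst_score := (PySem.List.min? (pvRow grid my_move) (fun x => x)).getD 0
  match st.2 with
  | some s =>
    if worst_score = s then (st.1 ++ [my_move], st.2)
    else if worst_score > s then ([my_move], some worst_score)
    else st
  | none => ([my_move], some worst_score)

-- body of A's second loop: online argmin of the column maximum (float('inf') sentinel = `none`).
def pvBody2 (grid : List (List Int)) (st : List Int × Option Int) (my_move : Int) : List Int × Option Int :=
  let opp_best_score := (PySem.List.max? ((PySem.List.pyRange 0 3 1).map
      (fun o => PySem.List.pyGetD (pvRow grid o) my_move 0)) (fun x => x)).getD 0
  match st.2 with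
  | some s =>
    if opp_best_score = s then (st.1 ++ [my_move], st.2)
    else if opp_best_score < s then ([my_move], some opp_best_score)
    else st
  | none => ([my_move], some opp_best_score)

def strategize (grid : List (List Int)) (store : List (String × Int)) : Int :=
  let s1 := (PySem.List.pyRange 0 3 1).foldl (pvBody1 grid) ([], none)
  let s2 := (PySem.List.pyRange 0 3 1).foldl (pvBody2 grid) ([], none)
  let best_of_both := s1.1.filter (fun m => s2.1.contains m)
  match best_of_both with
  | h :: _ => h
  | [] => s1.1.headD 0

-- ===== PORT B =====
-- Port of B: compute best (maximin value) and worst (minimax value), then a single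
-- min(range(3), key = 2*(row min ≠ best) + (column max ≠ worst)); PySem.List.min?
-- returns the FIRST minimising element, like Python's min.  The Python bool-as-int
-- arithmetic 2*(x != y) is ported as `if x ≠ y then 1 else 0`.
def strategize_alt (grid : List (List Int)) (store : List (String × Int)) : Int :=
  let best := (PySem.List.max? ((PySem.List.pyRange 0 3 1).map
      (fun i => (PySem.List.min? (pvRow grid i) (fun x => x)).getD 0)) (fun x => x)).getD 0
  let worst := (PySem.List.min? ((PySem.List.pyRange 0 3 1).map
      (fun m => (PySem.List.max? ((PySem.List.pyRange 0 3 1).map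
          (fun o => PySem.List.pyGetD (pvRow grid o) m 0)) (fun x => x)).getD 0)) (fun x => x)).getD 0
  (PySem.List.min? (PySem.List.pyRange 0 3 1) (fun m =>
      2 * (if (PySem.List.min? (pvRow grid m) (fun x => x)).getD 0 ≠ best then (1 : Int) else 0)
      + (if (PySem.List.max? ((PySem.List.pyRange 0 3 1).map
          (fun o => PySem.List.pyGetD (pvRow grid o) m 0)) (fun x => x)).getD 0 ≠ worst
         then (1 : Int) else 0))).getD 0

-- ===== PRECONDITION & SPEC =====
-- Exactly the inputs on which the Python A returns: at least 3 rows and each of the first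
-- 3 rows has at least 3 entries (otherwise grid[i]/grid[o][m]/min() raises).
def Pre_strategize (grid : List (List Int)) (store : List (String × Int)) : Prop :=
  3 ≤ grid.length ∧ ∀ r ∈ grid.take 3, 3 ≤ r.length
instance (grid : List (List Int)) (store : List (String × Int)) : Decidable (Pre_strategize grid store) := by unfold Pre_strategize; infer_instance

def pvWitness_strategize : List (List Int) × (List (String × Int)) :=
  ([[1, 2, 3], [4, 5, 6], [7, 8, 9]], [])

def Spec_strategize (grid : List (List Int)) (store : List (String × Int)) (out : Int) : Prop := out = strategize_alt grid store
instance (grid : List (List Int)) (store : List (String × Int)) (out : Int) : Decidable (Spec_strategize grid store out) := by unfold Spec_strategize; infer_instance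

-- ===== CLAIM (what is proved, stated in full; the proofs are below) =====
def Claim_equal_strategize : Prop := ∀ (grid : List (List Int)) (store : List (String × Int)), Dom_strategize grid store → Pre_strategize grid store → Spec_strategize grid store (strategize grid store)

-- ===== LEMMAS AND PROOFS =====

theorem pvRange3 : PySem.List.pyRange 0 3 1 = [0, 1, 2] := by decide

-- A's first loop over moves 0,1,2 computes exactly (argmax-tied indices, some (max of scores)).
set_option maxRecDepth 8192 in
set_option maxHeartbeats 1000000 in
theorem pvFold1 (grid : List (List Int)) (wa wb wc : Int)
    (h0 : (PySem.List.min? (pvRow grid 0) (fun x => x)).getD 0 = wa)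
    (h1 : (PySem.List.min? (pvRow grid 1) (fun x => x)).getD 0 = wb)
    (h2 : (PySem.List.min? (pvRow grid 2) (fun x => x)).getD 0 = wc) :
    pvBody1 grid (pvBody1 grid (pvBody1 grid ([], none) 0) 1) 2 =
    ((if wa = max (max wa wb) wc then ([0] : List Int) else []) ++
     (if wb = max (max wa wb) wc then [1] else []) ++
     (if wc = max (max wa wb) wc then [2] else []),
     some (max (max wa wb) wc)) := by
  simp only [pvBody1, h0, h1, h2, max_def]
  clear h0 h1 h2
  split_ifs <;> simp_all <;> (try omega) <;> split_ifs <;> simp_all <;> omega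

-- A's second loop computes exactly (argmin-tied indices, some (min of scores)).
set_option maxRecDepth 8192 in
set_option maxHeartbeats 1000000 in
theorem pvFold2 (grid : List (List Int)) (ca cb cc : Int)
    (h0 : (PySem.List.max? ((PySem.List.pyRange 0 3 1).map
        (fun o => PySem.List.pyGetD (pvRow grid o) 0 0)) (fun x => x)).getD 0 = ca)
    (h1 : (PySem.List.max? ((PySem.List.pyRange 0 3 1).map
        (fun o => PySem.List.pyGetD (pvRow grid o) 1 0)) (fun x => x)).getD 0 = cb)
    (h2 : (PySem.List.max? ((PySem.List.pyRange 0 3 1).map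
        (fun o => PySem.List.pyGetD (pvRow grid o) 2 0)) (fun x => x)).getD 0 = cc) :
    pvBody2 grid (pvBody2 grid (pvBody2 grid ([], none) 0) 1) 2 =
    ((if ca = min (min ca cb) cc then ([0] : List Int) else []) ++
     (if cb = min (min ca cb) cc then [1] else []) ++
     (if cc = min (min ca cb) cc then [2] else []),
     some (min (min ca cb) cc)) := by
  simp only [pvBody2, h0, h1, h2, min_def]
  clear h0 h1 h2
  split_ifs <;> simp_all <;> (try omega) <;> split_ifs <;> simp_all <;> omega

-- PySem.List.min? on [0,1,2] is the first index minimising the key.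
theorem pvMin3 (f : Int → Int) :
    PySem.List.min? [0, 1, 2] f = some
      (if f 0 ≤ f 1 then (if f 0 ≤ f 2 then (0 : Int) else 2)
       else (if f 1 ≤ f 2 then 1 else 2)) := by
  simp [PySem.List.min?]
  split_ifs <;> simp_all <;> omega

-- The two selection rules agree whenever the maximin value M is attained by some row
-- and the minimax value W by some column (they always are) — finite case analysis over
-- the six attainment conditions.
set_option maxRecDepth 16384 in
set_option maxHeartbeats 2000000 in
theorem pvFinal (wa wb wc ca cb cc M W : Int)
    (hM : M = max (max wa wb) wc) (hW : W = min (min ca cb) cc) :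
    (match ((if wa = M then ([0] : List Int) else []) ++
            (if wb = M then [1] else []) ++
            (if wc = M then [2] else [])).filter
        (fun m => ((if ca = W then ([0] : List Int) else []) ++
                   (if cb = W then [1] else []) ++
                   (if cc = W then [2] else [])).contains m) with
     | h :: _ => h
     | [] => ((if wa = M then ([0] : List Int) else []) ++
              (if wb = M then [1] else []) ++
              (if wc = M then [2] else [])).headD 0)
    = (if 2 * (if wa ≠ M then (1 : Int) else 0) + (if ca ≠ W then (1 : Int) else 0) ≤
           2 * (if wb ≠ M then 1 else 0) + (if cb ≠ W then 1 else 0) then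
         (if 2 * (if wa ≠ M then (1 : Int) else 0) + (if ca ≠ W then (1 : Int) else 0) ≤
             2 * (if wc ≠ M then 1 else 0) + (if cc ≠ W then 1 else 0) then (0 : Int) else 2)
       else (if 2 * (if wb ≠ M then (1 : Int) else 0) + (if cb ≠ W then (1 : Int) else 0) ≤
             2 * (if wc ≠ M then 1 else 0) + (if cc ≠ W then 1 else 0) then 1 else 2)) := by
  have hb : M = wa ∨ M = wb ∨ M = wc := by omega
  have hw : W = ca ∨ W = cb ∨ W = cc := by omega
  clear hM hW
  by_cases p0 : wa = M <;> by_cases p1 : wb = M <;> by_cases p2 : wc = M <;>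
  by_cases p3 : ca = W <;> by_cases p4 : cb = W <;> by_cases p5 : cc = W <;>
  simp_all <;> omega

-- ===== VERDICT (by name: the statement is the Claim_ definition above) =====
theorem strategize_spec : Claim_equal_strategize := by
  intro grid store _ _
  unfold Spec_strategize strategize strategize_alt
  simp only [pvRange3, List.map, PySem.List.max?_id_cons, PySem.List.min?_id_cons,
    List.foldl, Option.getD_some, pvMin3]
  set wa := (PySem.List.min? (pvRow grid 0) (fun x => x)).getD 0 with hwa
  set wb := (PySem.List.min? (pvRow grid 1) (fun x => x)).getD 0 with hwb
  set wc := (PySem.List.min? (pvRow grid 2) (fun x => x)).getD 0 with hwc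
  set ca := max (max (PySem.List.pyGetD (pvRow grid 0) 0 0) (PySem.List.pyGetD (pvRow grid 1) 0 0)) (PySem.List.pyGetD (pvRow grid 2) 0 0) with hca
  set cb := max (max (PySem.List.pyGetD (pvRow grid 0) 1 0) (PySem.List.pyGetD (pvRow grid 1) 1 0)) (PySem.List.pyGetD (pvRow grid 2) 1 0) with hcb
  set cc := max (max (PySem.List.pyGetD (pvRow grid 0) 2 0) (PySem.List.pyGetD (pvRow grid 1) 2 0)) (PySem.List.pyGetD (pvRow grid 2) 2 0) with hcc
  rw [pvFold1 grid wa wb wc hwa.symm hwb.symm hwc.symm,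
      pvFold2 grid ca cb cc
        (by simp only [pvRange3, List.map, PySem.List.max?_id_cons, List.foldl, Option.getD_some]; exact hca.symm)
        (by simp only [pvRange3, List.map, PySem.List.max?_id_cons, List.foldl, Option.getD_some]; exact hcb.symm)
        (by simp only [pvRange3, List.map, PySem.List.max?_id_cons, List.foldl, Option.getD_some]; exact hcc.symm)]
  exact pvFinal wa wb wc ca cb cc _ _ rfl rfl
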